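-- pv_equiv track=rewrite | github.com/jiwookseo/problem-solving | TopCoder/practice_problems/AccessChanger.py | convert
-- ===== SOURCE A (Python) =====
-- def convert(program):
--     result = []
--     for code in program:
--         check_arrow = check_comment = False
--         temp = ""
--         for i in range(len(code)):
--             if (code[i] == "-"):
--                 check_arrow = True
--                 check_comment = False
--                 temp += code[i]
--             elif (check_arrow and code[i] == ">"):
--                 check_arrow = check_comment = False
--                 temp = temp[:-1] + "."
--             elif (code[i] == "/"):
--                 if check_comment:
--                     temp = temp + code[i:]
--                     break
--                 else:
--                     temp += code[i]
--                     check_arrow = False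
--                     check_comment = True
--             else:
--                 temp += code[i]
--                 check_arrow = check_comment = False
--         result.append(temp)
--     return tuple(result)
-- ===== SOURCE B (Python) =====
-- def convert(program):
--     result = []
--     for code in program:
--         idx = code.find("//")
--         if idx == -1:
--             result.append(code.replace("->", "."))
--         else:
--             result.append(code[:idx].replace("->", ".") + code[idx:])
--     return tuple(result)
-- ===== Notes on version B (the rewrite author's own statement) =====
-- stated objective: simpler
-- what changed: Replaced A's per-character state machine (check_arrow/check_comment flags, char-by-char string building) with a single find of the first '//' plus one bulk str.replace('->','.') on the code part before it, keeping the comment suffix verbatim.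
import Mathlib
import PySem

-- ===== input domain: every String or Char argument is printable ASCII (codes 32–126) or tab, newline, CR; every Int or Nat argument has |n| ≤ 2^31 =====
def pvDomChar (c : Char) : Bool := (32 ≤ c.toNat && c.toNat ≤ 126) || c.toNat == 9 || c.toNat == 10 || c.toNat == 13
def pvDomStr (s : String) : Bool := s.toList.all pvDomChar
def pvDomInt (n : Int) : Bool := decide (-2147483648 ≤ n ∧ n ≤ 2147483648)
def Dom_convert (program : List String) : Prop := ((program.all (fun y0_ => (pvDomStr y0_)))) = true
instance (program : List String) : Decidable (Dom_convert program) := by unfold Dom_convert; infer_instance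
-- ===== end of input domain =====

-- B replaces A's per-character flag automaton (check_arrow/check_comment) by one find of the
-- first "//" plus a bulk "->"→"." replacement of the code part before it (objective: simpler).

-- ===== PORT A =====
-- literal transliteration of A's inner character loop: state = (check_arrow, check_comment, temp),
-- the `break` branch returns temp ++ code[i:] directly
def loopA (arrow comment : Bool) (temp : List Char) : List Char → List Char
  | [] => temp
  | c :: cs =>
    if c = '-' then loopA true false (temp ++ [c]) cs
    else if arrow ∧ c = '>' then loopA false false (temp.dropLast ++ ['.']) cs
    else if c = '/' then
      if comment then temp ++ (c :: cs)
      else loopA false true (temp ++ [c]) cs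
    else loopA false false (temp ++ [c]) cs

def convert (program : List String) : List String :=
  program.map (fun code => String.ofList (loopA false false [] code.toList))

-- ===== PORT B =====
-- one line of B: idx = code.find("//"); no comment → whole line replaced, else prefix replaced + suffix verbatim
def convLineB (code : List Char) : List Char :=
  let idx := PySem.Chars.find code ['/', '/']
  if idx = -1 then PySem.Chars.replace code ['-', '>'] ['.']
  else PySem.Chars.replace (PySem.List.slice code none (some idx)) ['-', '>'] ['.']
         ++ PySem.List.slice code (some idx) none

def convert_alt (program : List String) : List String :=
  program.map (fun code => String.ofList (convLineB code.toList))

-- ===== PRECONDITION & SPEC =====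
def Spec_convert (program : List String) (out : List String) : Prop := out = convert_alt program
instance (program : List String) (out : List String) : Decidable (Spec_convert program out) := by unfold Spec_convert; infer_instance

-- ===== CLAIM (what is proved, stated in full; the proofs are below) =====
def Claim_equal_convert : Prop := ∀ (program : List String), Dom_convert program → Spec_convert program (convert program)

-- ===== LEMMAS AND PROOFS =====

-- proof-side characterisation of one converted line: the first "//" freezes the rest,
-- "->" pairs before it become "." left to right
def lineSpec : List Char → List Char
  | [] => []
  | c :: r =>
    if c = '/' ∧ r.head? = some '/' then c :: r
    else if c = '-' ∧ r.head? = some '>' then '.' :: lineSpec r.tail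
    else c :: lineSpec r
  termination_by cs => cs.length
  decreasing_by all_goals simp [List.length_tail]

-- proof-side form of str.replace("->", ".")
def replSpec : List Char → List Char
  | [] => []
  | c :: r =>
    if c = '-' ∧ r.head? = some '>' then '.' :: replSpec r.tail
    else c :: replSpec r
  termination_by cs => cs.length
  decreasing_by all_goals simp [List.length_tail]

lemma prefix2_iff (a b c : Char) (t : List Char) :
    ([a, b] <+: (c :: t)) ↔ (c = a ∧ t.head? = some b) := by
  cases t <;> simp [List.cons_prefix_cons, eq_comm]

lemma head?_take_eq {r : List Char} {j : Nat} {x : Char}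
    (h : (r.take j).head? = some x) : r.head? = some x := by
  cases r <;> cases j <;> simp_all

-- str.replace("->",".") is replSpec
lemma replace_go_eq : ∀ (fuel : Nat) (l acc : List Char), l.length ≤ fuel →
    PySem.Chars.replace.go ['-', '>'] ['.'] fuel l acc = acc.reverse ++ replSpec l := by
  intro fuel
  induction fuel with
  | zero =>
    intro l acc h
    have : l = [] := List.eq_nil_of_length_eq_zero (by omega)
    subst this
    simp [PySem.Chars.replace.go, replSpec]
  | succ n ih =>
    intro l acc h
    match l with
    | [] => simp [PySem.Chars.replace.go, replSpec]
    | c :: t =>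
      rw [PySem.Chars.replace.go]
      by_cases hp : [('-' : Char), '>'] <+: (c :: t)
      · rw [if_pos (List.isPrefixOf_iff_prefix.mpr hp)]
        rw [prefix2_iff] at hp
        obtain ⟨hc, ht⟩ := hp
        cases t with
        | nil => simp at ht
        | cons t0 t2 =>
          simp only [List.head?_cons, Option.some.injEq] at ht
          subst hc; subst ht
          have hd : List.drop ['-', '>'].length ('-' :: '>' :: t2) = t2 := rfl
          rw [hd, ih t2 _ (by simp at h ⊢; omega)]
          simp [replSpec]
      · rw [if_neg (by simpa [List.isPrefixOf_iff_prefix] using hp)]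
        rw [ih t _ (by simp at h ⊢; omega)]
        rw [prefix2_iff] at hp
        simp only [replSpec, if_neg hp]
        simp

lemma replace_eq (cs : List Char) :
    PySem.Chars.replace cs ['-', '>'] ['.'] = replSpec cs := by
  rw [PySem.Chars.replace]
  simp only [List.isEmpty_cons, if_false, Bool.false_eq_true]
  simpa using replace_go_eq cs.length cs [] le_rfl

-- A's automaton computes lineSpec (state invariant: arrow ⇔ acc ends in '-', comment ⇔ acc ends in '/')
lemma loopA_eq : ∀ (n : Nat) (cs : List Char), cs.length ≤ n → ∀ acc : List Char,
    (loopA false false acc cs = acc ++ lineSpec cs)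
    ∧ (loopA true false (acc ++ ['-']) cs = acc ++ lineSpec ('-' :: cs))
    ∧ (loopA false true (acc ++ ['/']) cs = acc ++ lineSpec ('/' :: cs)) := by
  intro n
  induction n with
  | zero =>
    intro cs h acc
    have : cs = [] := List.eq_nil_of_length_eq_zero (by omega)
    subst this
    simp [loopA, lineSpec]
  | succ n ih =>
    intro cs h acc
    match cs with
    | [] => simp [loopA, lineSpec]
    | c :: r =>
      have hr : r.length ≤ n := by simp at h; omega
      have IH := ih r hr
      refine ⟨?_, ?_, ?_⟩
      · -- state (false, false)
        by_cases hc1 : c = '-'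
        · subst hc1
          rw [loopA, if_pos rfl]
          rw [(IH acc).2.1]
        · by_cases hc3 : c = '/'
          · subst hc3
            rw [loopA, if_neg (by simp), if_neg (by simp), if_pos rfl, if_neg (by simp)]
            rw [(IH acc).2.2]
          · rw [loopA, if_neg hc1, if_neg (by simp), if_neg hc3]
            rw [(IH (acc ++ [c])).1]
            have h2 : ¬(c = '-' ∧ r.head? = some '>') := by simp [hc1]
            have h1 : ¬(c = '/' ∧ r.head? = some '/') := by simp [hc3]
            rw [lineSpec, if_neg h1, if_neg h2]
            simp
      · -- state (true, false), acc ends in '-'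
        by_cases hc1 : c = '-'
        · subst hc1
          rw [loopA, if_pos rfl]
          rw [(IH (acc ++ ['-'])).2.1]
          conv_rhs => rw [lineSpec]
          rw [if_neg (by simp), if_neg (by cases r <;> simp)]
          simp
        · by_cases hc2 : c = '>'
          · subst hc2
            rw [loopA, if_neg (by simp), if_pos ⟨rfl, rfl⟩]
            rw [List.dropLast_concat]
            rw [(IH (acc ++ ['.'])).1]
            conv_rhs => rw [lineSpec]
            rw [if_neg (by simp), if_pos (by simp)]
            simp
          · by_cases hc3 : c = '/'
            · subst hc3
              rw [loopA, if_neg (by simp), if_neg (by simp [hc2]), if_pos rfl, if_neg (by simp)]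
              rw [(IH (acc ++ ['-'])).2.2]
              conv_rhs => rw [lineSpec]
              rw [if_neg (by simp), if_neg (by simp)]
              simp
            · rw [loopA, if_neg hc1, if_neg (by simp [hc2]), if_neg hc3]
              rw [(IH (acc ++ ['-'] ++ [c])).1]
              conv_rhs => rw [lineSpec]
              rw [if_neg (by simp), if_neg (by simp [hc2])]
              rw [lineSpec, if_neg (by simp [hc3]), if_neg (by simp [hc1])]
              simp
      · -- state (false, true), acc ends in '/'
        by_cases hc1 : c = '-'
        · subst hc1
          rw [loopA, if_pos rfl]
          rw [(IH (acc ++ ['/'])).2.1]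
          conv_rhs => rw [lineSpec]
          rw [if_neg (by simp), if_neg (by simp)]
          simp
        · by_cases hc3 : c = '/'
          · subst hc3
            rw [loopA, if_neg (by simp), if_neg (by simp), if_pos rfl, if_pos rfl]
            conv_rhs => rw [lineSpec]
            rw [if_pos (by simp)]
            simp
          · rw [loopA, if_neg hc1, if_neg (by simp), if_neg hc3]
            rw [(IH (acc ++ ['/'] ++ [c])).1]
            conv_rhs => rw [lineSpec]
            rw [if_neg (by simp [hc3])]
            rw [if_neg (by simp)]
            rw [lineSpec, if_neg (by simp [hc3]), if_neg (by simp [hc1])]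
            simp

-- no "//" anywhere: lineSpec is plain replacement
lemma lineSpec_no_comment : ∀ (n : Nat) (cs : List Char), cs.length ≤ n →
    (∀ i : Nat, ¬ ([('/' : Char), '/'] <+: cs.drop i)) → lineSpec cs = replSpec cs := by
  intro n
  induction n with
  | zero =>
    intro cs h _
    have : cs = [] := List.eq_nil_of_length_eq_zero (by omega)
    subst this; simp [lineSpec, replSpec]
  | succ n ih =>
    intro cs h hno
    match cs with
    | [] => simp [lineSpec, replSpec]
    | c :: r =>
      have h0 : ¬(c = '/' ∧ r.head? = some '/') := by
        have := hno 0; rw [List.drop_zero, prefix2_iff] at this; exact this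
      rw [lineSpec, replSpec, if_neg h0]
      by_cases h2 : c = '-' ∧ r.head? = some '>'
      · rw [if_pos h2, if_pos h2]
        obtain ⟨_, ht⟩ := h2
        cases r with
        | nil => simp at ht
        | cons r0 r2 =>
          simp only [List.head?_cons, Option.some.injEq] at ht
          subst ht
          simp only [List.tail_cons]
          rw [ih r2 (by simp at h; omega) (fun i => by simpa using hno (i + 2))]
      · rw [if_neg h2, if_neg h2]
        rw [ih r (by simp at h; omega) (fun i => by simpa using hno (i + 1))]

-- first "//" at position k: replacement on the prefix, the rest verbatim
lemma lineSpec_comment : ∀ (n : Nat) (cs : List Char), cs.length ≤ n → ∀ k : Nat,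
    (∀ i : Nat, i < k → ¬ ([('/' : Char), '/'] <+: cs.drop i)) →
    ([('/' : Char), '/'] <+: cs.drop k) →
    lineSpec cs = replSpec (cs.take k) ++ cs.drop k := by
  intro n
  induction n with
  | zero =>
    intro cs h k _ hk
    have : cs = [] := List.eq_nil_of_length_eq_zero (by omega)
    subst this; simp at hk
  | succ n ih =>
    intro cs h k hmin hk
    match cs with
    | [] => simp at hk
    | c :: r =>
      cases k with
      | zero =>
        rw [List.drop_zero, prefix2_iff] at hk
        rw [lineSpec, if_pos hk]
        simp [replSpec]
      | succ j =>
        have h0 : ¬(c = '/' ∧ r.head? = some '/') := by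
          have := hmin 0 (by omega); rw [List.drop_zero, prefix2_iff] at this; exact this
        rw [List.drop_succ_cons] at hk
        by_cases h2 : c = '-' ∧ r.head? = some '>'
        · obtain ⟨hc, ht⟩ := h2
          subst hc
          cases r with
          | nil => simp at ht
          | cons r0 r2 =>
            simp only [List.head?_cons, Option.some.injEq] at ht
            subst ht
            cases j with
            | zero =>
              rw [List.drop_zero, prefix2_iff] at hk
              simp at hk
            | succ i =>
              rw [List.drop_succ_cons] at hk
              rw [lineSpec, if_neg h0, if_pos (by simp), List.tail_cons]
              rw [ih r2 (by simp at h; omega) i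
                    (fun m hm => by simpa using hmin (m + 2) (by omega)) hk]
              simp only [List.take_succ_cons, List.drop_succ_cons]
              rw [replSpec, if_pos (by simp)]
              simp
        · rw [lineSpec, if_neg h0, if_neg h2]
          rw [List.take_succ_cons, List.drop_succ_cons]
          rw [ih r (by simp at h; omega) j
                (fun m hm => by simpa using hmin (m + 1) (by omega)) hk]
          rw [replSpec]
          rw [if_neg (fun ⟨hc, ht⟩ => h2 ⟨hc, head?_take_eq ht⟩)]
          simp

lemma convLineB_eq (cs : List Char) : convLineB cs = lineSpec cs := by
  unfold convLineB
  by_cases hk : PySem.Chars.find cs ['/', '/'] = -1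
  · rw [if_pos hk, replace_eq]
    have hinf : ¬ (['/', '/'] <:+: cs) := (PySem.Chars.find_eq_neg_one_iff cs ['/', '/']).mp hk
    refine (lineSpec_no_comment cs.length cs le_rfl ?_).symm
    intro i hpre
    exact hinf ((PySem.Chars.isIn_iff_infix ['/', '/'] cs).mp
      ((PySem.Chars.exists_prefix_drop_iff_isIn ['/', '/'] cs).mp ⟨i, hpre⟩))
  · rw [if_neg hk]
    have h0 : 0 ≤ PySem.Chars.find cs ['/', '/'] := by
      have := PySem.Chars.neg_one_le_find cs ['/', '/']
      omega
    obtain ⟨hpre, hmin⟩ := PySem.Chars.find_spec (s := cs) (sub := ['/', '/']) h0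
    rw [PySem.List.slice_to cs h0, PySem.List.slice_from cs h0, replace_eq]
    exact (lineSpec_comment cs.length cs le_rfl _ hmin hpre).symm

lemma line_eq (cs : List Char) : loopA false false [] cs = convLineB cs := by
  rw [convLineB_eq]
  simpa using (loopA_eq cs.length cs le_rfl []).1

-- ===== VERDICT (by name: the statement is the Claim_ definition above) =====
theorem convert_spec : Claim_equal_convert := by
  intro program _
  unfold Spec_convert convert convert_alt
  exact List.map_congr_left (fun code _ => by rw [line_eq])
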